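-- pv_equiv track=rewrite | github.com/berndprach/AdventOfCode2023 | day18/part1.py | find_path_positions
-- ===== SOURCE A (Python) =====
-- Position = tuple[int, int]
--
-- DIRECTION: dict[str, Position] = {
--     "U": (0, -1),
--     "D": (0, 1),
--     "L": (-1, 0),
--     "R": (1, 0),
-- }
--
-- def get_new_position(current_position: Position,
--                      direction: str,
--                      distance: int = 1,
--                      ) -> Position:
--     x, y = current_position
--     dx, dy = DIRECTION[direction]
--     return x + dx * distance, y + dy * distance
--
-- def find_path_positions(instructions) -> set[Position]:
--     path_positions = set()
--     current_position = (0, 0)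
--     for instruction in instructions:
--         direction, distance = instruction
--         for _ in range(distance):
--             current_position = get_new_position(current_position, direction)
--             path_positions.add(current_position)
--
--     assert current_position == (0, 0)
--     return path_positions
-- ===== SOURCE B (Python) =====
-- DELTA = {"U": (0, -1), "D": (0, 1), "L": (-1, 0), "R": (1, 0)}
--
--
-- def find_path_positions(instructions):
--     # Pass 1: jump corner to corner, accumulating the polyline vertices.
--     x, y = 0, 0
--     corners = [(0, 0)]
--     for direction, distance in instructions:
--         if distance > 0:
--             dx, dy = DELTA[direction]
--             x, y = x + dx * distance, y + dy * distance
--             corners.append((x, y))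
--     assert corners[-1] == (0, 0)
--     # Pass 2: fill every cell strictly after each corner up to the next.
--     cells = set()
--     for (x0, y0), (x1, y1) in zip(corners, corners[1:]):
--         sx = (x1 > x0) - (x1 < x0)
--         sy = (y1 > y0) - (y1 < y0)
--         for k in range(1, abs(x1 - x0) + abs(y1 - y0) + 1):
--             cells.add((x0 + sx * k, y0 + sy * k))
--     return cells
-- ===== Notes on version B (the rewrite author's own statement) =====
-- stated objective: alternative
-- what changed: A enumerates the path cell-by-cell in one fused loop over instructions and unit steps; B first collects the polyline corner vertices in one pass and then fills each edge between consecutive corners in a second pass.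
-- outside the precondition, e.g. on find_path_positions([('R', 1)]): A raises AssertionError, B raises AssertionError; on find_path_positions([('X', 1), ('L', 0)]): A raises KeyError, B raises KeyError
import Mathlib
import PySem

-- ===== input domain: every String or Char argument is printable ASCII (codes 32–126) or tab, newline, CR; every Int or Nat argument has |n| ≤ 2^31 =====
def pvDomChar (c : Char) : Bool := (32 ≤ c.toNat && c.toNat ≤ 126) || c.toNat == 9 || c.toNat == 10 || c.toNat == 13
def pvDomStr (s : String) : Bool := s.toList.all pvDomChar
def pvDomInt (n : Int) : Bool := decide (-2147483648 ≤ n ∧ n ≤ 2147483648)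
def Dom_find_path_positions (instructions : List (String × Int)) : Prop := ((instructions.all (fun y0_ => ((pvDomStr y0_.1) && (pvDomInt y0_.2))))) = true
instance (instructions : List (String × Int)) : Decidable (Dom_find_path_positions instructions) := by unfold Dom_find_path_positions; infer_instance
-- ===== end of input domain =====

-- B replaces A's fused cell-by-cell walk by a build-corner-vertices pass followed by an
-- edge-filling pass over consecutive corners (objective: alternative decomposition, not faster).

-- ===== PORT A =====
def DIRECTION : PySem.Dict String (Int × Int) :=
  PySem.Dict.ofList [("U", (0, -1)), ("D", (0, 1)), ("L", (-1, 0)), ("R", (1, 0))]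

-- DIRECTION[direction] may raise KeyError: modelled as none.
def get_new_position (current_position : Int × Int) (direction : String) (distance : Int) :
    Option (Int × Int) :=
  match PySem.Dict.get? DIRECTION direction with
  | none => none
  | some (dx, dy) =>
      some (current_position.1 + dx * distance, current_position.2 + dy * distance)

def find_path_positions (instructions : List (String × Int)) : List (Int × Int) :=
  let st := instructions.foldl
    (fun (st : Option (PySem.Set (Int × Int) × (Int × Int))) instruction =>
      match st with
      | none => none
      | some ps =>
        (PySem.List.pyRange 0 instruction.2 1).foldl
          (fun st2 _ =>
            match st2 with
            | none => none
            | some (path_positions, current_position) =>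
              match get_new_position current_position instruction.1 1 with
              | none => none
              | some p => some (PySem.Set.add path_positions p, p))
          (some ps))
    (some (PySem.Set.empty, ((0 : Int), (0 : Int))))
  match st with
  | none => []                                   -- KeyError: excluded by Pre_
  | some (path_positions, current_position) =>
      if current_position = ((0 : Int), (0 : Int)) then path_positions
      else []                                    -- AssertionError: excluded by Pre_

-- ===== PORT B =====
def DELTA : PySem.Dict String (Int × Int) :=
  PySem.Dict.ofList [("U", (0, -1)), ("D", (0, 1)), ("L", (-1, 0)), ("R", (1, 0))]

def find_path_positions_alt (instructions : List (String × Int)) : List (Int × Int) :=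
  -- pass 1: corner vertices
  let st := instructions.foldl
    (fun (st : Option ((Int × Int) × List (Int × Int))) ins =>
      match st with
      | none => none
      | some ((x, y), corners) =>
        if (0 : Int) < ins.2 then
          match PySem.Dict.get? DELTA ins.1 with
          | none => none                         -- KeyError: excluded by Pre_
          | some (dx, dy) =>
              some ((x + dx * ins.2, y + dy * ins.2),
                    corners ++ [(x + dx * ins.2, y + dy * ins.2)])
        else some ((x, y), corners))
    (some (((0 : Int), (0 : Int)), [((0 : Int), (0 : Int))]))
  match st with
  | none => []
  | some (_, corners) =>
    if PySem.List.pyGet? corners (-1) = some ((0 : Int), (0 : Int)) then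
      -- pass 2: fill every cell strictly after each corner up to the next
      (corners.zip (PySem.List.slice corners (some 1) none)).foldl
        (fun cells pq =>
          (PySem.List.pyRange 1
              (((pq.2.1 - pq.1.1).natAbs : Int) + ((pq.2.2 - pq.1.2).natAbs : Int) + 1) 1).foldl
            (fun cells k =>
              PySem.Set.add cells
                (pq.1.1 + ((if pq.1.1 < pq.2.1 then (1 : Int) else 0) -
                           (if pq.2.1 < pq.1.1 then (1 : Int) else 0)) * k,
                 pq.1.2 + ((if pq.1.2 < pq.2.2 then (1 : Int) else 0) -
                           (if pq.2.2 < pq.1.2 then (1 : Int) else 0)) * k))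
            cells)
        PySem.Set.empty
    else []                                      -- AssertionError: excluded by Pre_

-- ===== PRECONDITION & SPEC =====
def pvDelta (d : String) : Int × Int :=
  if d = "U" then (0, -1) else if d = "D" then (0, 1)
  else if d = "L" then (-1, 0) else if d = "R" then (1, 0) else (0, 0)

-- Pre_ excludes exactly the inputs where A raises: a KeyError (an instruction with positive
-- distance whose direction is not U/D/L/R) or the final AssertionError (the net displacement,
-- a plain signed sum over the instructions, is not (0,0)).
def Pre_find_path_positions (instructions : List (String × Int)) : Prop :=
  (∀ p ∈ instructions, 0 < p.2 → (p.1 = "U" ∨ p.1 = "D" ∨ p.1 = "L" ∨ p.1 = "R")) ∧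
  instructions.foldl
      (fun (acc : Int × Int) p =>
        if 0 < p.2 then (acc.1 + (pvDelta p.1).1 * p.2, acc.2 + (pvDelta p.1).2 * p.2) else acc)
      ((0 : Int), (0 : Int)) = ((0 : Int), (0 : Int))

instance (instructions : List (String × Int)) : Decidable (Pre_find_path_positions instructions) := by
  unfold Pre_find_path_positions; infer_instance

def pvWitness_find_path_positions : (List (String × Int)) :=
  [("R", 2), ("D", 1), ("L", 2), ("U", 1)]

def Spec_find_path_positions (instructions : List (String × Int)) (out : List (Int × Int)) : Prop := out = find_path_positions_alt instructions
instance (instructions : List (String × Int)) (out : List (Int × Int)) : Decidable (Spec_find_path_positions instructions out) := by unfold Spec_find_path_positions; infer_instance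

-- ===== CLAIM (what is proved, stated in full; the proofs are below) =====
def Claim_equal_find_path_positions : Prop := ∀ (instructions : List (String × Int)), Dom_find_path_positions instructions → Pre_find_path_positions instructions → Spec_find_path_positions instructions (find_path_positions instructions)

-- ===== LEMMAS AND PROOFS =====

-- the per-instruction position update (the function Pre_'s fold uses, named)
def stepPos (p : Int × Int) (q : String × Int) : Int × Int :=
  if 0 < q.2 then (p.1 + (pvDelta q.1).1 * q.2, p.2 + (pvDelta q.1).2 * q.2) else p

-- the cells visited walking n unit steps of delta δ from p (excluding p itself)
def segCells (p δ : Int × Int) (n : Nat) : List (Int × Int) :=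
  (List.range n).map (fun k => (p.1 + δ.1 * ((k : Int) + 1), p.2 + δ.2 * ((k : Int) + 1)))

-- all cells along the whole path, in visiting order
def pathCells (p : Int × Int) : List (String × Int) → List (Int × Int)
  | [] => []
  | q :: rest =>
      (if 0 < q.2 then segCells p (pvDelta q.1) q.2.toNat else []) ++ pathCells (stepPos p q) rest

-- the corner vertices B collects (excluding the start corner)
def cornerList (p : Int × Int) : List (String × Int) → List (Int × Int)
  | [] => []
  | q :: rest => (if 0 < q.2 then [stepPos p q] else []) ++ cornerList (stepPos p q) rest

-- named forms of the ports' loop bodies (definitionally equal to the inline lambdas)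
def A_inner (d : String) (st2 : Option (PySem.Set (Int × Int) × (Int × Int))) :
    Option (PySem.Set (Int × Int) × (Int × Int)) :=
  match st2 with
  | none => none
  | some (path_positions, current_position) =>
    match get_new_position current_position d 1 with
    | none => none
    | some p => some (PySem.Set.add path_positions p, p)

def A_outer (st : Option (PySem.Set (Int × Int) × (Int × Int))) (instruction : String × Int) :
    Option (PySem.Set (Int × Int) × (Int × Int)) :=
  match st with
  | none => none
  | some ps => (PySem.List.pyRange 0 instruction.2 1).foldl (fun st2 _ => A_inner instruction.1 st2) (some ps)

def B_corner (st : Option ((Int × Int) × List (Int × Int))) (ins : String × Int) :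
    Option ((Int × Int) × List (Int × Int)) :=
  match st with
  | none => none
  | some ((x, y), corners) =>
    if (0 : Int) < ins.2 then
      match PySem.Dict.get? DELTA ins.1 with
      | none => none
      | some (dx, dy) =>
          some ((x + dx * ins.2, y + dy * ins.2), corners ++ [(x + dx * ins.2, y + dy * ins.2)])
    else some ((x, y), corners)

def B_fill (cells : PySem.Set (Int × Int)) (pq : (Int × Int) × (Int × Int)) : PySem.Set (Int × Int) :=
  (PySem.List.pyRange 1
      (((pq.2.1 - pq.1.1).natAbs : Int) + ((pq.2.2 - pq.1.2).natAbs : Int) + 1) 1).foldl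
    (fun cells k =>
      PySem.Set.add cells
        (pq.1.1 + ((if pq.1.1 < pq.2.1 then (1 : Int) else 0) -
                   (if pq.2.1 < pq.1.1 then (1 : Int) else 0)) * k,
         pq.1.2 + ((if pq.1.2 < pq.2.2 then (1 : Int) else 0) -
                   (if pq.2.2 < pq.1.2 then (1 : Int) else 0)) * k))
    cells

theorem portA_eq (ins : List (String × Int)) :
    find_path_positions ins =
      (match ins.foldl A_outer (some (PySem.Set.empty, ((0 : Int), (0 : Int)))) with
       | none => []
       | some (path_positions, current_position) =>
         if current_position = ((0 : Int), (0 : Int)) then path_positions else []) := rfl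

theorem portB_eq (ins : List (String × Int)) :
    find_path_positions_alt ins =
      (match ins.foldl B_corner (some (((0 : Int), (0 : Int)), [((0 : Int), (0 : Int))])) with
       | none => []
       | some (_, corners) =>
         if PySem.List.pyGet? corners (-1) = some ((0 : Int), (0 : Int)) then
           (corners.zip (PySem.List.slice corners (some 1) none)).foldl B_fill PySem.Set.empty
         else []) := rfl

theorem dir_get (d : String) (h : d = "U" ∨ d = "D" ∨ d = "L" ∨ d = "R") :
    PySem.Dict.get? DIRECTION d = some (pvDelta d) := by
  rcases h with h | h | h | h <;> subst h <;> decide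

theorem delta_get (d : String) (h : d = "U" ∨ d = "D" ∨ d = "L" ∨ d = "R") :
    PySem.Dict.get? DELTA d = some (pvDelta d) := dir_get d h

theorem foldl_ignore {α β : Type} (g : α → α) :
    ∀ (l : List β) (init : α), l.foldl (fun st _ => g st) init = g^[l.length] init
  | [], _ => rfl
  | _ :: t, init => by
      simp only [List.foldl_cons, List.length_cons, foldl_ignore g t, Function.iterate_succ_apply]

theorem iterA (d : String) (dx dy : Int) (hd : PySem.Dict.get? DIRECTION d = some (dx, dy)) :
    ∀ (n : Nat) (s : PySem.Set (Int × Int)) (p : Int × Int),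
      (A_inner d)^[n] (some (s, p))
        = some ((segCells p (dx, dy) n).foldl PySem.Set.add s,
                (p.1 + dx * n, p.2 + dy * n)) := by
  intro n
  induction n with
  | zero => intro s p; simp [segCells]
  | succ n ih =>
    intro s p
    rw [Function.iterate_succ_apply', ih]
    simp only [A_inner, get_new_position, hd]
    have hseg : segCells p (dx, dy) (n + 1)
        = segCells p (dx, dy) n ++ [(p.1 + dx * ((n : Int) + 1), p.2 + dy * ((n : Int) + 1))] := by
      simp [segCells, List.range_succ]
    rw [hseg, List.foldl_append]
    simp only [List.foldl_cons, List.foldl_nil]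
    push_cast
    have e1 : p.1 + dx * (n : Int) + dx * 1 = p.1 + dx * ((n : Int) + 1) := by ring
    have e2 : p.2 + dy * (n : Int) + dy * 1 = p.2 + dy * ((n : Int) + 1) := by ring
    rw [e1, e2]

theorem A_outer_some (s : PySem.Set (Int × Int)) (p : Int × Int) (q : String × Int) :
    A_outer (some (s, p)) q = (A_inner q.1)^[q.2.toNat] (some (s, p)) := by
  simp only [A_outer]
  rw [foldl_ignore]
  congr 1
  simp [PySem.List.length_pyRange_one]

theorem stepPos_pos (p : Int × Int) (q : String × Int) (h2 : 0 < q.2) :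
    stepPos p q = (p.1 + (pvDelta q.1).1 * q.2, p.2 + (pvDelta q.1).2 * q.2) := by
  simp [stepPos, h2]

theorem mainA : ∀ (ins : List (String × Int)),
    (∀ q ∈ ins, 0 < q.2 → (q.1 = "U" ∨ q.1 = "D" ∨ q.1 = "L" ∨ q.1 = "R")) →
    ∀ (s : PySem.Set (Int × Int)) (p : Int × Int),
    ins.foldl A_outer (some (s, p))
      = some ((pathCells p ins).foldl PySem.Set.add s, ins.foldl stepPos p)
  | [], _, s, p => by simp [pathCells]
  | q :: rest, hv, s, p => by
    have hrest := fun q' hq' => hv q' (List.mem_cons_of_mem _ hq')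
    simp only [List.foldl_cons]
    rw [A_outer_some]
    by_cases h2 : 0 < q.2
    · have hd := hv q List.mem_cons_self h2
      have hget : PySem.Dict.get? DIRECTION q.1 = some ((pvDelta q.1).1, (pvDelta q.1).2) := by
        rw [dir_get q.1 hd]
      rw [iterA q.1 (pvDelta q.1).1 (pvDelta q.1).2 hget q.2.toNat s p]
      rw [mainA rest hrest]
      have hcast : (q.2.toNat : Int) = q.2 := by omega
      have hstep : (p.1 + (pvDelta q.1).1 * (q.2.toNat : Int),
                    p.2 + (pvDelta q.1).2 * (q.2.toNat : Int)) = stepPos p q := by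
        rw [hcast, stepPos_pos p q h2]
      rw [hstep]
      have hpc : pathCells p (q :: rest)
          = segCells p ((pvDelta q.1).1, (pvDelta q.1).2) q.2.toNat ++ pathCells (stepPos p q) rest := by
        simp [pathCells, h2]
      rw [hpc, List.foldl_append]
    · have hz : q.2.toNat = 0 := by omega
      have hp : stepPos p q = p := by simp [stepPos, h2]
      rw [hz]
      simp only [Function.iterate_zero, id_eq]
      rw [mainA rest hrest s p]
      simp [pathCells, h2, hp]

theorem mainB : ∀ (ins : List (String × Int)),
    (∀ q ∈ ins, 0 < q.2 → (q.1 = "U" ∨ q.1 = "D" ∨ q.1 = "L" ∨ q.1 = "R")) →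
    ∀ (p : Int × Int) (acc : List (Int × Int)),
    ins.foldl B_corner (some (p, acc))
      = some (ins.foldl stepPos p, acc ++ cornerList p ins)
  | [], _, p, acc => by simp [cornerList]
  | q :: rest, hv, p, acc => by
    obtain ⟨px, py⟩ := p
    have hrest := fun q' hq' => hv q' (List.mem_cons_of_mem _ hq')
    simp only [List.foldl_cons]
    by_cases h2 : 0 < q.2
    · have hd := hv q List.mem_cons_self h2
      have hget : PySem.Dict.get? DELTA q.1 = some ((pvDelta q.1).1, (pvDelta q.1).2) := by
        rw [delta_get q.1 hd]
      have hb : B_corner (some ((px, py), acc)) q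
          = some (stepPos (px, py) q, acc ++ [stepPos (px, py) q]) := by
        simp only [B_corner, h2, if_pos, hget]
        rw [stepPos_pos (px, py) q h2]
      rw [hb, mainB rest hrest]
      have hc : cornerList (px, py) (q :: rest)
          = stepPos (px, py) q :: cornerList (stepPos (px, py) q) rest := by
        simp [cornerList, h2]
      rw [hc]
      simp
    · have hp : stepPos (px, py) q = (px, py) := by simp [stepPos, h2]
      have hb : B_corner (some ((px, py), acc)) q = some ((px, py), acc) := by
        simp [B_corner, h2]
      rw [hb, mainB rest hrest]
      have hc : cornerList (px, py) (q :: rest) = cornerList (px, py) rest := by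
        simp [cornerList, h2, hp]
      rw [hc, hp]

theorem lastCorner : ∀ (ins : List (String × Int)) (p : Int × Int),
    (p :: cornerList p ins).getLast? = some (ins.foldl stepPos p)
  | [], p => by simp [cornerList]
  | q :: rest, p => by
    by_cases h2 : 0 < q.2
    · have hc : cornerList p (q :: rest)
          = stepPos p q :: cornerList (stepPos p q) rest := by
        simp [cornerList, h2]
      rw [hc, List.getLast?_cons_cons, lastCorner rest (stepPos p q), List.foldl_cons]
    · have hp : stepPos p q = p := by simp [stepPos, h2]
      have hc : cornerList p (q :: rest) = cornerList p rest := by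
        simp [cornerList, h2, hp]
      rw [hc, lastCorner rest p, List.foldl_cons, hp]

theorem fill_range_eq (p : Int × Int) (dx dy : Int) (n : Nat) (s : PySem.Set (Int × Int))
    (F : PySem.Set (Int × Int) → Int → PySem.Set (Int × Int))
    (hF : ∀ cells k, F cells k = PySem.Set.add cells (p.1 + dx * k, p.2 + dy * k)) :
    (PySem.List.pyRange 1 ((n : Int) + 1) 1).foldl F s
      = (segCells p (dx, dy) n).foldl PySem.Set.add s := by
  induction n generalizing s with
  | zero =>
    rw [PySem.List.pyRange_one_eq_nil (by omega)]
    simp [segCells]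
  | succ n ih =>
    have hb : ((n + 1 : Nat) : Int) + 1 = ((n : Int) + 1) + 1 := by push_cast; ring
    rw [hb, PySem.List.pyRange_one_succ_right (by omega), List.foldl_append]
    rw [ih]
    have hseg : segCells p (dx, dy) (n + 1)
        = segCells p (dx, dy) n ++ [(p.1 + dx * ((n : Int) + 1), p.2 + dy * ((n : Int) + 1))] := by
      simp [segCells, List.range_succ]
    rw [hseg, List.foldl_append]
    simp only [List.foldl_cons, List.foldl_nil, hF]

theorem fillEdge (p : Int × Int) (q : String × Int)
    (hd : q.1 = "U" ∨ q.1 = "D" ∨ q.1 = "L" ∨ q.1 = "R") (h2 : 0 < q.2)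
    (s : PySem.Set (Int × Int)) :
    B_fill s (p, stepPos p q)
      = (segCells p (pvDelta q.1) q.2.toNat).foldl PySem.Set.add s := by
  obtain ⟨px, py⟩ := p
  rw [stepPos_pos _ q h2]
  rcases hd with h | h | h | h <;> rw [h] <;> unfold B_fill <;> dsimp only
  · rw [show pvDelta "U" = ((0 : Int), (-1 : Int)) from by decide]
    dsimp only
    rw [show (((px + 0 * q.2 - px).natAbs : Int) + ((py + (-1) * q.2 - py).natAbs : Int) + 1)
        = ((q.2.toNat : Int) + 1) from by omega]
    apply fill_range_eq (px, py) 0 (-1) q.2.toNat s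
    intro cells k
    congr 1
    simp only [Prod.mk.injEq]
    constructor <;> (split_ifs <;> omega)
  · rw [show pvDelta "D" = ((0 : Int), (1 : Int)) from by decide]
    dsimp only
    rw [show (((px + 0 * q.2 - px).natAbs : Int) + ((py + 1 * q.2 - py).natAbs : Int) + 1)
        = ((q.2.toNat : Int) + 1) from by omega]
    apply fill_range_eq (px, py) 0 1 q.2.toNat s
    intro cells k
    congr 1
    simp only [Prod.mk.injEq]
    constructor <;> (split_ifs <;> omega)
  · rw [show pvDelta "L" = ((-1 : Int), (0 : Int)) from by decide]
    dsimp only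
    rw [show (((px + (-1) * q.2 - px).natAbs : Int) + ((py + 0 * q.2 - py).natAbs : Int) + 1)
        = ((q.2.toNat : Int) + 1) from by omega]
    apply fill_range_eq (px, py) (-1) 0 q.2.toNat s
    intro cells k
    congr 1
    simp only [Prod.mk.injEq]
    constructor <;> (split_ifs <;> omega)
  · rw [show pvDelta "R" = ((1 : Int), (0 : Int)) from by decide]
    dsimp only
    rw [show (((px + 1 * q.2 - px).natAbs : Int) + ((py + 0 * q.2 - py).natAbs : Int) + 1)
        = ((q.2.toNat : Int) + 1) from by omega]
    apply fill_range_eq (px, py) 1 0 q.2.toNat s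
    intro cells k
    congr 1
    simp only [Prod.mk.injEq]
    constructor <;> (split_ifs <;> omega)

theorem fillB : ∀ (ins : List (String × Int)),
    (∀ q ∈ ins, 0 < q.2 → (q.1 = "U" ∨ q.1 = "D" ∨ q.1 = "L" ∨ q.1 = "R")) →
    ∀ (p : Int × Int) (s : PySem.Set (Int × Int)),
    ((p :: cornerList p ins).zip (cornerList p ins)).foldl B_fill s
      = (pathCells p ins).foldl PySem.Set.add s
  | [], _, p, s => by simp [cornerList, pathCells]
  | q :: rest, hv, p, s => by
    have hrest := fun q' hq' => hv q' (List.mem_cons_of_mem _ hq')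
    by_cases h2 : 0 < q.2
    · have hd := hv q List.mem_cons_self h2
      have hc : cornerList p (q :: rest)
          = stepPos p q :: cornerList (stepPos p q) rest := by
        simp [cornerList, h2]
      rw [hc]
      simp only [List.zip_cons_cons, List.foldl_cons]
      rw [fillEdge p q hd h2 s, fillB rest hrest (stepPos p q)]
      have hpc : pathCells p (q :: rest)
          = segCells p (pvDelta q.1) q.2.toNat ++ pathCells (stepPos p q) rest := by
        simp [pathCells, h2]
      rw [hpc, List.foldl_append]
    · have hp : stepPos p q = p := by simp [stepPos, h2]
      have hc : cornerList p (q :: rest) = cornerList p rest := by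
        simp [cornerList, h2, hp]
      have hpc : pathCells p (q :: rest) = pathCells p rest := by
        simp [pathCells, h2, hp]
      rw [hc, hpc, fillB rest hrest p s]

theorem find_path_positions_spec : Claim_equal_find_path_positions := by
  intro ins _hdom hpre
  obtain ⟨hv, hzero⟩ := hpre
  have hzero' : ins.foldl stepPos ((0 : Int), (0 : Int)) = ((0 : Int), (0 : Int)) := hzero
  unfold Spec_find_path_positions
  rw [portA_eq, portB_eq]
  rw [mainA ins hv PySem.Set.empty ((0 : Int), (0 : Int))]
  rw [mainB ins hv ((0 : Int), (0 : Int)) [((0 : Int), (0 : Int))]]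
  simp only [hzero', List.singleton_append]
  rw [PySem.List.pyGet?_neg_one, lastCorner ins ((0 : Int), (0 : Int)), hzero']
  rw [PySem.List.slice_from_one]
  simp only [List.tail_cons, if_pos]
  rw [fillB ins hv ((0 : Int), (0 : Int)) PySem.Set.empty]
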